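-- pv_equiv track=rewrite | github.com/lukin-vy/HomeWork3 | customers_functions.py | get_possible_next_actions
-- ===== SOURCE A (Python) =====
-- from collections import Counter
--
-- def get_possible_next_actions(opponent_series, last_actions):
--     #Объявим счетчик
--     counter_steps = Counter()
--     #В цикле пройдемся по всем ходам оппонента
--     for index, value in enumerate(opponent_series):
--         #Если проверяемый ход такой же как предыдущий ход
--         #и это не последний элемент списка
--         if value == last_actions and index != len(opponent_series) - 1:
--             #То запишем следующий по индексу ход
--             counter_steps[opponent_series[index+1]] =+1
--     #Определим самый частый следующий ход оппонента
--     often_next_actions = counter_steps.most_common(1)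
--     if len(often_next_actions) != 0:
--         #Если нашли значение
--         return often_next_actions[0][0]
--     else:
--         #Если ничего не нашли
--         return None
-- ===== SOURCE B (Python) =====
-- def get_possible_next_actions(opponent_series, last_actions):
--     # Note: A's "=+1" typo makes every counter value 1, so most_common(1)
--     # returns the first-inserted key: the element right after the FIRST
--     # matching (non-final) occurrence. One early-return pass suffices.
--     for index, value in enumerate(opponent_series):
--         if value == last_actions and index != len(opponent_series) - 1:
--             return opponent_series[index + 1]
--     return None
-- ===== Notes on version B (the rewrite author's own statement) =====
-- stated objective: simpler
-- what changed: A's '=+1' typo assigns 1 to every counter entry, so most_common(1) just returns the first-inserted key; B drops the Counter entirely and returns the element after the first matching non-final occurrence in one early-return scan.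
import Mathlib
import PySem

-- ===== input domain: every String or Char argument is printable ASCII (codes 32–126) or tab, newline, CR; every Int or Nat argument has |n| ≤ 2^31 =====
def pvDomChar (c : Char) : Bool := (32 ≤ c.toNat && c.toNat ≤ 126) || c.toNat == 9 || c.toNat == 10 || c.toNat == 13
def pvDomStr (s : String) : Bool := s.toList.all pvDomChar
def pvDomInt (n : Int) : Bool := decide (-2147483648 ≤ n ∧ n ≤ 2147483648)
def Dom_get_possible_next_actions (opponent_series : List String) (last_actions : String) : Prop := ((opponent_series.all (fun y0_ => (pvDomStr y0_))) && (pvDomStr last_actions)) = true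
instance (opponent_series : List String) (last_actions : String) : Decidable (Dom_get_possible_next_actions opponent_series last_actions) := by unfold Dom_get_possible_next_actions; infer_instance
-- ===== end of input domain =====

-- B replaces A's Counter + most_common machinery (made vacuous by A's '=+1' typo, which
-- sets every count to 1) by a single early-return scan; objective: simpler, same behaviour.

-- ===== PORT A =====
-- for index, value in enumerate(...): if value == last_actions and index != len-1:
--   counter_steps[opponent_series[index+1]] = 1   (the '=+1' typo: plain assignment of +1)
-- the pyGet? here is always `some` when the guard holds (index+1 is in range); the
-- `none` branch keeps the dict unchanged and is unreachable.
def get_possible_next_actions (opponent_series : List String) (last_actions : String) : Option String :=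
  let counter :=
    (PySem.List.enumerate opponent_series).foldl
      (fun (d : PySem.Dict String Int) (iv : Int × String) =>
        if iv.2 = last_actions ∧ iv.1 ≠ PySem.List.len opponent_series - 1 then
          match PySem.List.pyGet? opponent_series (iv.1 + 1) with
          | some nxt => d.insert nxt 1
          | none => d
        else d)
      PySem.Dict.empty
  -- counter_steps.most_common(1): the first item of maximal count, if any
  match PySem.List.max? counter.items (fun p => p.2) with
  | some p => some p.1
  | none => none

-- ===== PORT B =====
-- one pass; returns opponent_series[index+1] at the first matching, non-final index
def pvAltGo (opponent_series : List String) (last_actions : String) :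
    List String → Nat → Option String
  | [], _ => none
  | v :: rest, i =>
      if v = last_actions ∧ (i : Int) ≠ PySem.List.len opponent_series - 1 then
        PySem.List.pyGet? opponent_series ((i : Int) + 1)
      else pvAltGo opponent_series last_actions rest (i + 1)

def get_possible_next_actions_alt (opponent_series : List String) (last_actions : String) : Option String :=
  pvAltGo opponent_series last_actions opponent_series 0

-- ===== PRECONDITION & SPEC =====
def Spec_get_possible_next_actions (opponent_series : List String) (last_actions : String) (out : Option String) : Prop := out = get_possible_next_actions_alt opponent_series last_actions
instance (opponent_series : List String) (last_actions : String) (out : Option String) : Decidable (Spec_get_possible_next_actions opponent_series last_actions out) := by unfold Spec_get_possible_next_actions; infer_instance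

-- ===== CLAIM (what is proved, stated in full; the proofs are below) =====
def Claim_equal_get_possible_next_actions : Prop := ∀ (opponent_series : List String) (last_actions : String), Dom_get_possible_next_actions opponent_series last_actions → Spec_get_possible_next_actions opponent_series last_actions (get_possible_next_actions opponent_series last_actions)

-- ===== LEMMAS AND PROOFS =====

-- max? (first extremal element) of a list whose keys are all equal is its head
lemma pv_max?_all_one {α : Type} (l : List α) (key : α → Int)
    (h : ∀ p ∈ l, key p = 1) :
    PySem.List.max? l key = l.head? := by
  have aux : ∀ (t : List α) (m : α), key m = 1 → (∀ p ∈ t, key p = 1) →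
      t.foldl (fun acc x => match acc with
        | none => some x
        | some m => if key m < key x then some x else some m) (some m) = some m := by
    intro t
    induction t with
    | nil => intro m _ _; rfl
    | cons x xs ih =>
      intro m hm hall
      simp only [List.foldl_cons]
      have hx : key x = 1 := hall x (by simp)
      have : ¬ key m < key x := by omega
      simp only [this, if_false]
      exact ih m hm (fun p hp => hall p (by simp [hp]))
  cases l with
  | nil => rfl
  | cons p t =>
    simp only [PySem.List.max?, List.foldl_cons, List.head?_cons]
    exact aux t p (h p (by simp)) (fun q hq => h q (by simp [hq]))

-- inserting value 1 into an all-ones dict keeps the head item and the all-ones property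
lemma pv_insert_one_head (d : PySem.Dict String Int) (k : String)
    (h1 : ∀ p ∈ d.items, p.2 = (1:Int)) (hne : d.items ≠ []) :
    (d.insert k 1).items.head? = d.items.head? := by
  rcases hd : d.items with _ | ⟨p, t⟩
  · exact absurd hd hne
  · rw [PySem.Dict.items_insert, hd]
    by_cases hc : d.contains k = true
    · rw [if_pos hc]
      by_cases hk : p.1 == k
      · have hp2 : p.2 = (1:Int) := h1 p (by rw [hd]; simp)
        have hpk : p.1 = k := beq_iff_eq.mp hk
        simp only [List.map_cons, List.head?_cons]
        rw [if_pos hk, ← hpk, ← hp2]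
      · simp only [List.map_cons, List.head?_cons]
        rw [if_neg hk]
    · rw [if_neg (by simpa using hc)]
      simp

lemma pv_insert_one_all (d : PySem.Dict String Int) (k : String)
    (h1 : ∀ p ∈ d.items, p.2 = (1:Int)) :
    ∀ p ∈ (d.insert k 1).items, p.2 = (1:Int) := by
  intro p hp
  rcases (PySem.Dict.mem_items_insert _ _ _ _).mp hp with h | ⟨h, _⟩
  · simp [h]
  · exact h1 p h

-- the loop invariant: folding A's body over the enumerated suffix starting at index i,
-- from an all-ones dict d, yields a dict whose head item is d's head item if d is
-- nonempty, and otherwise B's scan result paired with count 1 — and stays all-ones.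
lemma pv_loop (os : List String) (la : String) :
    ∀ (l : List String) (i : Nat) (d : PySem.Dict String Int),
      l = os.drop i →
      (∀ p ∈ d.items, p.2 = (1:Int)) →
      (let r := (PySem.List.enumerate l (i : Int)).foldl
        (fun (d : PySem.Dict String Int) (iv : Int × String) =>
          if iv.2 = la ∧ iv.1 ≠ PySem.List.len os - 1 then
            match PySem.List.pyGet? os (iv.1 + 1) with
            | some nxt => d.insert nxt 1
            | none => d
          else d) d
       (∀ p ∈ r.items, p.2 = (1:Int)) ∧
       r.items.head? = (match d.items.head? with
         | some p => some p
         | none => (pvAltGo os la l i).map (fun s => (s, (1:Int))))) := by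
  intro l
  induction l with
  | nil =>
    intro i d _ h1
    simp only [PySem.List.enumerate, List.foldl_nil, pvAltGo]
    refine ⟨h1, ?_⟩
    cases d.items.head? <;> simp
  | cons v rest ih =>
    intro i d hdrop h1
    have hi : i < os.length := by
      by_contra h
      simp only [not_lt] at h
      rw [List.drop_eq_nil_of_le h] at hdrop
      exact List.cons_ne_nil _ _ hdrop
    have hcons : PySem.List.enumerate (v :: rest) (i : Int) =
        ((i : Int), v) :: PySem.List.enumerate rest ((i : Int) + 1) := rfl
    have hrest : rest = os.drop (i + 1) := by
      have := List.drop_eq_getElem_cons hi (l := os)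
      rw [this] at hdrop
      exact (List.cons.injEq _ _ _ _).mp hdrop |>.2
    have hcast : ((i : Int) + 1) = ((i + 1 : Nat) : Int) := by push_cast; ring
    simp only [hcons, List.foldl_cons, pvAltGo]
    by_cases hg : v = la ∧ (i : Int) ≠ PySem.List.len os - 1
    · -- the guard fires: index+1 is in range, pyGet? = some os[i+1]
      have hlt : i + 1 < os.length := by
        rcases hg with ⟨_, hne⟩
        have : (i : Int) ≠ (os.length : Int) - 1 := by
          simpa [PySem.List.len] using hne
        omega
      have hget : PySem.List.pyGet? os ((i : Int) + 1) = some os[i + 1] := by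
        rw [hcast, PySem.List.pyGet?_natCast, List.getElem?_eq_getElem hlt]
      rw [if_pos hg, if_pos hg, hget]
      have h1' := pv_insert_one_all d os[i + 1] h1
      rcases ih (i + 1) (d.insert os[i+1] 1) hrest h1' with ⟨hall, hhead⟩
      rw [hcast]
      refine ⟨hall, ?_⟩
      rw [hhead]
      cases hd : d.items with
      | nil =>
        have hdm : d = PySem.Dict.mk [] := PySem.Dict.ext hd
        subst hdm
        rfl
      | cons p t =>
        have hne : d.items ≠ [] := by simp [hd]
        rw [pv_insert_one_head d _ h1 hne]
        simp [hd]
    · rw [if_neg hg, if_neg hg]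
      rcases ih (i + 1) d hrest h1 with ⟨hall, hhead⟩
      rw [hcast]
      exact ⟨hall, hhead⟩

-- ===== VERDICT (by name: the statement is the Claim_ definition above) =====
theorem get_possible_next_actions_spec : Claim_equal_get_possible_next_actions := by
  intro os la _
  unfold Spec_get_possible_next_actions get_possible_next_actions get_possible_next_actions_alt
  rcases pv_loop os la os 0 PySem.Dict.empty (by simp) (by intro p hp; simp [PySem.Dict.empty] at hp)
    with ⟨hall, hhead⟩
  simp only [Nat.cast_zero, PySem.Dict.empty] at hall hhead
  simp only [PySem.Dict.empty, pv_max?_all_one _ _ hall, hhead, List.head?_nil]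
  cases pvAltGo os la os 0 <;> rfl
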